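-- pv_equiv track=rewrite | github.com/ketkat001/Programmers-coding | Level_4/버스여행.py | solution
-- ===== SOURCE A (Python) =====
-- from collections import deque
--
-- def solution(n, signs):
--     answer = [[0] * n for _ in range(n)]
--     root_list = [[] for _ in range(n)]
--     for i in range(n):
--         for j in range(n):
--             if signs[i][j] == 1:
--                 root_list[i].append(j)
--
--     for i in range(n):
--         queue = deque(root_list[i])
--         while queue:
--             next_stop = queue.popleft()
--             if answer[i][next_stop] == 0:
--                 answer[i][next_stop] = 1
--                 queue.extend(root_list[next_stop])
--
--     return answer
-- ===== SOURCE B (Python) =====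
-- def solution(n, signs):
--     masks = []
--     for i in range(n):
--         m = 0
--         for j in range(n):
--             if signs[i][j] == 1:
--                 m |= 1 << j
--         masks.append(m)
--     for k in range(n):
--         bit = 1 << k
--         for i in range(n):
--             if masks[i] & bit:
--                 masks[i] |= masks[k]
--     return [[(m >> j) & 1 for j in range(n)] for m in masks]
-- ===== Notes on version B (the rewrite author's own statement) =====
-- stated objective: faster
-- what changed: Replaces A's per-source deque BFS over adjacency lists by a Floyd-Warshall transitive closure on big-int bitmask rows (one int per row, merged with |=), so the inner per-neighbour loop disappears into word-parallel bit operations.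
import Mathlib
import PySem

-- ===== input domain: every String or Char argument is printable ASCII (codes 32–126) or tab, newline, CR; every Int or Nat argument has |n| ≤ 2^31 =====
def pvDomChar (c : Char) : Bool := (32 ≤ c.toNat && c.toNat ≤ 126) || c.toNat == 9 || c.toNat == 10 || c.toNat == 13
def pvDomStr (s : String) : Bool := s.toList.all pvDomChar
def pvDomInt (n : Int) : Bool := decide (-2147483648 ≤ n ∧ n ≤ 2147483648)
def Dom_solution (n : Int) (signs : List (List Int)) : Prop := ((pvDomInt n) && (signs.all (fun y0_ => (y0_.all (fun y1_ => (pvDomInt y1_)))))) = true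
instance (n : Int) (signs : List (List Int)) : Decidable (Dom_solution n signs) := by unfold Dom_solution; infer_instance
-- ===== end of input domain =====

-- B replaces A's per-source deque BFS by a bitset Floyd-Warshall transitive closure (rows as
-- Python big-int bitmasks, a word-parallel constant-factor speed mechanism); equal return
-- values on all inputs where A returns (Pre_solution excludes exactly A's IndexError inputs).

-- ===== PORT A =====
-- inner loop `for j in range(n): if signs[i][j] == 1: root_list[i].append(j)`;
-- `signs[i][j]` raising IndexError is excluded by Pre_solution (the port's guard reads a
-- missing entry as "not 1" there, exact on Pre_solution)
def rootRow (signs : List (List Int)) (n i : Int) : List Int :=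
  (PySem.List.pyRange 0 n 1).foldl
    (fun acc j =>
      if ((PySem.List.pyGet? signs i).bind fun r => PySem.List.pyGet? r j) = some 1
      then acc ++ [j] else acc) []

-- `root_list = [[] for _ in range(n)]` filled row by row by the nested loops
def rootList (signs : List (List Int)) (n : Int) : List (List Int) :=
  (PySem.List.pyRange 0 n 1).foldl (fun acc i => acc ++ [rootRow signs n i]) []

-- termination helpers for the while-loop (each pass either marks a fresh 0-entry or shortens the queue)
lemma pySetD_of_pyGet?_eq_some {α : Type} {xs : List α} {i : Int} {v : α} (w : α)
    (h : PySem.List.pyGet? xs i = some v) :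
    ∃ k : Nat, k < xs.length ∧ xs[k]? = some v ∧ PySem.List.pySetD xs i w = xs.set k w := by
  unfold PySem.List.pyGet? at h
  cases hk : PySem.List.pyIdx? xs.length i with
  | none => rw [hk] at h; simp at h
  | some k =>
    rw [hk] at h; simp at h
    exact ⟨k, by have := List.getElem?_eq_some_iff.mp h; exact this.1, h, by
      simp [PySem.List.pySetD, PySem.List.pySet?, hk]⟩

lemma count_set_one_lt {xs : List Int} {k : Nat} (hk : xs[k]? = some 0) :
    (xs.set k 1).count 0 < xs.count 0 := by
  induction xs generalizing k with
  | nil => simp at hk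
  | cons x xs ih =>
    cases k with
    | zero =>
      simp only [List.getElem?_cons_zero, Option.some.injEq] at hk
      subst hk
      simp [List.count_cons]
    | succ k =>
      simp only [List.getElem?_cons_succ] at hk
      have := ih hk
      simpa [List.count_cons] using this

-- the `while queue:` loop for one source row
def bfs (rl : List (List Int)) (row : List Int) (queue : List Int) : List Int :=
  match queue with
  | [] => row
  | q :: rest =>
    if h : PySem.List.pyGet? row q = some 0 then
      bfs rl (PySem.List.pySetD row q 1) (rest ++ ((PySem.List.pyGet? rl q).getD []))
    else
      bfs rl row rest
termination_by (row.count 0, queue.length)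
decreasing_by
  · obtain ⟨k, hk, hv, hset⟩ := pySetD_of_pyGet?_eq_some 1 h
    exact Prod.Lex.left _ _ (hset ▸ count_set_one_lt hv)
  · exact Prod.Lex.right _ (by simp)

def solution (n : Int) (signs : List (List Int)) : List (List Int) :=
  let rl := rootList signs n
  (PySem.List.pyRange 0 n 1).foldl
    (fun ans i =>
      ans ++ [bfs rl (List.replicate n.toNat 0) ((PySem.List.pyGet? rl i).getD [])]) []

-- ===== PORT B =====
-- `m |= 1 << j` for each j in range(n) with signs[i][j] == 1 (j ≥ 0 here, so j.toNat is exact;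
-- a raising signs[i][j] is excluded by Pre_solution, the guard reads it as "not 1")
def buildMask (signs : List (List Int)) (n i : Int) : Int :=
  (PySem.List.pyRange 0 n 1).foldl
    (fun m j =>
      if ((PySem.List.pyGet? signs i).bind fun r => PySem.List.pyGet? r j) = some 1
      then PySem.Int.bor m ((1 : Int) <<< j.toNat) else m) 0

-- `for i in range(n): if masks[i] & bit: masks[i] |= masks[k]`  (bit = 1 << k, k ≥ 0)
def warshallStep (n : Int) (ms : List Int) (k : Int) : List Int :=
  (PySem.List.pyRange 0 n 1).foldl
    (fun ms i =>
      if PySem.Int.band (PySem.List.pyGetD ms i 0) ((1 : Int) <<< k.toNat) ≠ 0 then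
        PySem.List.pySetD ms i
          (PySem.Int.bor (PySem.List.pyGetD ms i 0) (PySem.List.pyGetD ms k 0))
      else ms) ms

def solution_alt (n : Int) (signs : List (List Int)) : List (List Int) :=
  let masks0 := (PySem.List.pyRange 0 n 1).foldl (fun acc i => acc ++ [buildMask signs n i]) []
  let masks := (PySem.List.pyRange 0 n 1).foldl (fun ms k => warshallStep n ms k) masks0
  masks.map (fun m => (PySem.List.pyRange 0 n 1).map (fun j => PySem.Int.band (m >>> j.toNat) 1))

-- ===== PRECONDITION & SPEC =====
-- Pre_solution excludes exactly the inputs where Python A raises IndexError reading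
-- signs[i][j] (fewer than n rows, or one of the first n rows shorter than n); A returns on
-- every other input and none is excluded.
def Pre_solution (n : Int) (signs : List (List Int)) : Prop :=
  n.toNat ≤ signs.length ∧ ∀ r ∈ signs.take n.toNat, n.toNat ≤ r.length

instance (n : Int) (signs : List (List Int)) : Decidable (Pre_solution n signs) := by
  unfold Pre_solution; infer_instance

def pvWitness_solution : Int × List (List Int) := (2, [[0, 1], [1, 0]])

def Spec_solution (n : Int) (signs : List (List Int)) (out : List (List Int)) : Prop :=
  out = solution_alt n signs
instance (n : Int) (signs : List (List Int)) (out : List (List Int)) : Decidable (Spec_solution n signs out) := by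
  unfold Spec_solution; infer_instance

-- ===== CLAIM (what is proved, stated in full; the proofs are below) =====
def Claim_equal_solution : Prop := ∀ (n : Int) (signs : List (List Int)),
  Dom_solution n signs → Pre_solution n signs → Spec_solution n signs (solution n signs)

-- ===== LEMMAS AND PROOFS =====

-- `signs[i][j] == 1` with both indices in range(n): the edge relation of the bus-stop graph
def edg (signs : List (List Int)) (n : Int) (i j : Nat) : Prop :=
  (i : Int) < n ∧ (j : Int) < n ∧
    ((PySem.List.pyGet? signs (i : Int)).bind fun r => PySem.List.pyGet? r (j : Int)) = some 1

-- a path i → j whose intermediate stops are listed in order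
def chain (signs : List (List Int)) (n : Int) : List Nat → Nat → Nat → Prop
  | [], i, j => edg signs n i j
  | m :: l, i, j => edg signs n i m ∧ chain signs n l m j

def Reach (signs : List (List Int)) (n : Int) (i j : Nat) : Prop := ∃ l, chain signs n l i j

-- paths whose intermediate stops are all < K (Warshall's invariant)
def Pk (signs : List (List Int)) (n : Int) (K i j : Nat) : Prop :=
  ∃ l, (∀ m ∈ l, m < K) ∧ chain signs n l i j

lemma chain_target_lt {signs : List (List Int)} {n : Int} {l : List Nat} {i j : Nat}
    (h : chain signs n l i j) : (j : Int) < n := by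
  induction l generalizing i with
  | nil => exact h.2.1
  | cons m l ih => exact ih h.2

lemma chain_mem_lt {signs : List (List Int)} {n : Int} {l : List Nat} {i j : Nat}
    (h : chain signs n l i j) : ∀ m ∈ l, (m : Int) < n := by
  induction l generalizing i with
  | nil => simp
  | cons m l ih =>
    intro x hx
    rcases List.mem_cons.mp hx with hx | hx
    · subst hx; exact h.1.2.1
    · exact ih h.2 x hx

lemma chain_snoc {signs : List (List Int)} {n : Int} {l : List Nat} {i q m : Nat}
    (h : chain signs n l i q) (he : edg signs n q m) : chain signs n (l ++ [q]) i m := by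
  induction l generalizing i with
  | nil => exact ⟨h, he⟩
  | cons x l ih => exact ⟨h.1, ih h.2⟩

lemma chain_decomp {signs : List (List Int)} {n : Int} {l1 l2 : List Nat} {m i j : Nat} :
    chain signs n (l1 ++ m :: l2) i j ↔ chain signs n l1 i m ∧ chain signs n l2 m j := by
  induction l1 generalizing i with
  | nil => simp [chain]
  | cons x l ih => simp [chain, ih, and_assoc]

lemma chain_propagate {signs : List (List Int)} {n : Int} (S : Nat → Prop)
    (hS : ∀ a b, S a → edg signs n a b → S b) :
    ∀ (l : List Nat) (a j : Nat), S a → chain signs n l a j → S j := by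
  intro l
  induction l with
  | nil => intro a j ha h; exact hS a j ha h
  | cons m l ih => intro a j ha h; exact ih m j (hS a m ha h.1) h.2

lemma reach_elim {signs : List (List Int)} {n : Int} {i0 : Nat} (S : Nat → Prop)
    (h1 : ∀ m, edg signs n i0 m → S m)
    (h2 : ∀ a b, S a → edg signs n a b → S b) :
    ∀ j, Reach signs n i0 j → S j := by
  rintro j ⟨l, hl⟩
  cases l with
  | nil => exact h1 j hl
  | cons m l => exact chain_propagate S h2 l m j (h1 m hl.1) hl.2

lemma Pk_succ_aux {signs : List (List Int)} {n : Int} {K : Nat} :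
    ∀ (l : List Nat) (i j : Nat), (∀ m ∈ l, m < K + 1) → chain signs n l i j →
      Pk signs n K i j ∨ (Pk signs n K i K ∧ Pk signs n K K j) := by
  intro l
  induction l with
  | nil => intro i j _ hc; exact Or.inl ⟨[], by simp, hc⟩
  | cons m l ih =>
    intro i j hb hc
    have hm : m < K + 1 := hb m (by simp)
    have hrest : ∀ x ∈ l, x < K + 1 := fun x hx => hb x (by simp [hx])
    rcases Nat.lt_succ_iff_lt_or_eq.mp hm with hmK | hmK
    · rcases ih m j hrest hc.2 with ⟨l', hl', hc'⟩ | ⟨⟨l1, hl1, hc1⟩, hKj⟩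
      · refine Or.inl ⟨m :: l', ?_, hc.1, hc'⟩
        intro x hx
        rcases List.mem_cons.mp hx with h | h
        exacts [h ▸ hmK, hl' x h]
      · refine Or.inr ⟨⟨m :: l1, ?_, hc.1, hc1⟩, hKj⟩
        intro x hx
        rcases List.mem_cons.mp hx with h | h
        exacts [h ▸ hmK, hl1 x h]
    · have hKj : Pk signs n K K j := by
        rcases ih m j hrest hc.2 with h | ⟨_, h⟩ <;> exact hmK ▸ h
      exact Or.inr ⟨⟨[], by simp, hmK ▸ hc.1⟩, hKj⟩

lemma Pk_succ {signs : List (List Int)} {n : Int} {K i j : Nat} :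
    Pk signs n (K + 1) i j ↔
      Pk signs n K i j ∨ (Pk signs n K i K ∧ Pk signs n K K j) := by
  constructor
  · rintro ⟨l, hl, hc⟩
    exact Pk_succ_aux l i j hl hc
  · rintro (⟨l, hl, hc⟩ | ⟨⟨l1, hl1, hc1⟩, ⟨l2, hl2, hc2⟩⟩)
    · exact ⟨l, fun m hm => Nat.lt_succ_of_lt (hl m hm), hc⟩
    · refine ⟨l1 ++ K :: l2, ?_, chain_decomp.mpr ⟨hc1, hc2⟩⟩
      intro m hm
      rcases List.mem_append.mp hm with h | h
      · exact Nat.lt_succ_of_lt (hl1 m h)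
      · rcases List.mem_cons.mp h with h | h
        · omega
        · exact Nat.lt_succ_of_lt (hl2 m h)

lemma Reach_iff_PkN {signs : List (List Int)} {n : Int} {i j : Nat} :
    Reach signs n i j ↔ Pk signs n n.toNat i j := by
  constructor
  · rintro ⟨l, hl⟩
    exact ⟨l, fun m hm => by have := chain_mem_lt hl m hm; omega, hl⟩
  · rintro ⟨l, _, hl⟩; exact ⟨l, hl⟩

-- ---- root_list characterisation ----

lemma rootRow_eq (signs : List (List Int)) (n i : Int) :
    rootRow signs n i = (PySem.List.pyRange 0 n 1).filter
      (fun j => decide (((PySem.List.pyGet? signs i).bind fun r => PySem.List.pyGet? r j) = some 1)) := by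
  unfold rootRow
  rw [PySem.List.foldl_append_ite_eq_filter
    (p := fun j => ((PySem.List.pyGet? signs i).bind fun r => PySem.List.pyGet? r j) = some 1)]
  simp

lemma mem_rootRow_bounds {signs : List (List Int)} {n i q : Int}
    (h : q ∈ rootRow signs n i) : 0 ≤ q ∧ q < n := by
  rw [rootRow_eq] at h
  have := List.mem_filter.mp h
  exact PySem.List.mem_pyRange_one.mp this.1

lemma mem_rootRow {signs : List (List Int)} {n : Int} {i j : Nat} (hi : (i : Int) < n) :
    ((j : Int) ∈ rootRow signs n (i : Int)) ↔ edg signs n i j := by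
  rw [rootRow_eq, List.mem_filter]
  simp [PySem.List.mem_pyRange_one, edg, hi]

lemma rootList_eq (signs : List (List Int)) (n : Int) :
    rootList signs n = (PySem.List.pyRange 0 n 1).map (rootRow signs n) := by
  unfold rootList
  rw [PySem.List.foldl_append_singleton_eq_map]
  simp

lemma pyGet?_rootList {signs : List (List Int)} {n : Int} {q : Nat} (hq : q < n.toNat) :
    PySem.List.pyGet? (rootList signs n) (q : Int) = some (rootRow signs n (q : Int)) := by
  rw [rootList_eq, PySem.List.pyGet?_natCast, List.getElem?_map,
    PySem.List.getElem?_pyRange_one]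
  simp only [if_pos (by omega : q < (n - 0).toNat)]
  simp

-- ---- BFS correctness ----

def bfsInv (signs : List (List Int)) (n : Int) (i0 : Nat) (row : List Int) (queue : List Int) : Prop :=
  row.length = n.toNat ∧
  (∀ j, j < n.toNat → row.getD j 0 = 0 ∨ row.getD j 0 = 1) ∧
  (∀ j, j < n.toNat → row.getD j 0 = 1 → Reach signs n i0 j) ∧
  (∀ q ∈ queue, ∃ qn : Nat, q = (qn : Int) ∧ Reach signs n i0 qn) ∧
  (∀ m, edg signs n i0 m → row.getD m 0 = 1 ∨ (m : Int) ∈ queue) ∧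
  (∀ j m, j < n.toNat → row.getD j 0 = 1 → edg signs n j m → row.getD m 0 = 1 ∨ (m : Int) ∈ queue)

lemma getD_set (xs : List Int) (k j : Nat) (v : Int) (hk : k < xs.length) :
    (xs.set k v).getD j 0 = if j = k then v else xs.getD j 0 := by
  simp only [List.getD_eq_getElem?_getD, List.getElem?_set]
  split
  · rename_i h; rw [if_pos h.symm]; simp [hk, ← h]
  · rename_i h; rw [if_neg (fun hh => h hh.symm)]

lemma bfs_correct {signs : List (List Int)} {n : Int} {i0 : Nat}
    (row : List Int) (queue : List Int) (hInv : bfsInv signs n i0 row queue) :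
    (bfs (rootList signs n) row queue).length = n.toNat ∧
    (∀ j, j < n.toNat →
      ((bfs (rootList signs n) row queue).getD j 0 = 1 ↔ Reach signs n i0 j) ∧
      ((bfs (rootList signs n) row queue).getD j 0 = 0 ∨
       (bfs (rootList signs n) row queue).getD j 0 = 1)) := by
  induction row, queue using bfs.induct (rl := rootList signs n) with
  | case1 row =>
    obtain ⟨h1, h2, h3, _, h5, h6⟩ := hInv
    simp only [bfs]
    refine ⟨h1, fun j hj => ⟨⟨h3 j hj, ?_⟩, h2 j hj⟩⟩
    refine reach_elim (fun j => row.getD j 0 = 1) ?_ ?_ j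
    · intro m hm
      rcases h5 m hm with h | h
      · exact h
      · simp at h
    · intro a b ha hab
      have haN : a < n.toNat := by
        have := hab.1
        omega
      rcases h6 a b haN ha hab with h | h
      · exact h
      · simp at h
  | case2 row q rest h ih =>
    obtain ⟨h1, h2, h3, h4, h5, h6⟩ := hInv
    obtain ⟨qn, hq, hreach⟩ := h4 q (by simp)
    subst hq
    have hqn : qn < n.toNat := by
      obtain ⟨l, hl⟩ := hreach
      have := chain_target_lt hl
      omega
    have hqnn : (qn : Int) < n := by omega
    have hrow0 : row.getD qn 0 = 0 := by
      rw [PySem.List.pyGet?_natCast] at h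
      simp [List.getD_eq_getElem?_getD, h]
    have hset : PySem.List.pySetD row ((qn : Nat) : Int) 1 = row.set qn 1 := by
      simp [PySem.List.pySetD_natCast]
    have hrl : (PySem.List.pyGet? (rootList signs n) ((qn : Nat) : Int)).getD []
        = rootRow signs n ((qn : Nat) : Int) := by
      rw [pyGet?_rootList hqn]
      rfl
    simp only [bfs]
    rw [dif_pos h]
    refine ih ?_
    rw [hset, hrl]
    have hmark : ∀ m : Nat, row.getD m 0 = 1 → (row.set qn 1).getD m 0 = 1 := by
      intro m hm
      rw [getD_set _ _ _ _ (by omega)]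
      split <;> [rfl; exact hm]
    refine ⟨by simp [h1], ?_, ?_, ?_, ?_, ?_⟩
    · intro j hj
      rw [getD_set _ _ _ _ (by omega)]
      split
      · exact Or.inr rfl
      · exact h2 j hj
    · intro j hj hjv
      rw [getD_set _ _ _ _ (by omega)] at hjv
      by_cases hjq : j = qn
      · exact hjq ▸ hreach
      · rw [if_neg hjq] at hjv
        exact h3 j hj hjv
    · intro x hx
      rcases List.mem_append.mp hx with hx | hx
      · exact h4 x (by simp [hx])
      · obtain ⟨hx0, hxn⟩ := mem_rootRow_bounds hx
        refine ⟨x.toNat, (Int.toNat_of_nonneg hx0).symm, ?_⟩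
        have hxcast : ((x.toNat : Nat) : Int) = x := Int.toNat_of_nonneg hx0
        have hedge : edg signs n qn x.toNat := by
          rw [← mem_rootRow hqnn]
          rw [hxcast]
          exact hx
        obtain ⟨l, hl⟩ := hreach
        exact ⟨l ++ [qn], chain_snoc hl hedge⟩
    · intro m hm
      rcases h5 m hm with hv | hv
      · exact Or.inl (hmark m hv)
      · rcases List.mem_cons.mp hv with hv | hv
        · have : m = qn := by omega
          subst this
          refine Or.inl ?_
          rw [getD_set _ _ _ _ (by omega)]
          simp
        · exact Or.inr (List.mem_append.mpr (Or.inl hv))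
    · intro j m hj hjv hedge
      rw [getD_set _ _ _ _ (by omega)] at hjv
      by_cases hjq : j = qn
      · subst hjq
        refine Or.inr (List.mem_append.mpr (Or.inr ?_))
        rw [mem_rootRow hqnn]
        exact hedge
      · rw [if_neg hjq] at hjv
        rcases h6 j m hj hjv hedge with hv | hv
        · exact Or.inl (hmark m hv)
        · rcases List.mem_cons.mp hv with hv | hv
          · have : m = qn := by omega
            subst this
            refine Or.inl ?_
            rw [getD_set _ _ _ _ (by omega)]
            simp
          · exact Or.inr (List.mem_append.mpr (Or.inl hv))
  | case3 row q rest h ih =>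
    obtain ⟨h1, h2, h3, h4, h5, h6⟩ := hInv
    obtain ⟨qn, hq, hreach⟩ := h4 q (by simp)
    subst hq
    have hqn : qn < n.toNat := by
      obtain ⟨l, hl⟩ := hreach
      have := chain_target_lt hl
      omega
    have hq1 : row.getD qn 0 = 1 := by
      rcases h2 qn hqn with hv | hv
      · exfalso
        apply h
        rw [PySem.List.pyGet?_natCast]
        rw [List.getD_eq_getElem?_getD] at hv
        cases hg : row[qn]? with
        | none =>
          exfalso
          have := List.getElem?_eq_none_iff.mp hg
          omega
        | some x =>
          rw [hg] at hv
          simp at hv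
          exact congrArg some hv
      · exact hv
    simp only [bfs]
    rw [dif_neg h]
    refine ih ?_
    refine ⟨h1, h2, h3, fun x hx => h4 x (by simp [hx]), ?_, ?_⟩
    · intro m hm
      rcases h5 m hm with hv | hv
      · exact Or.inl hv
      · rcases List.mem_cons.mp hv with hv | hv
        · have : m = qn := by omega
          exact Or.inl (this ▸ hq1)
        · exact Or.inr hv
    · intro j m hj hjv hedge
      rcases h6 j m hj hjv hedge with hv | hv
      · exact Or.inl hv
      · rcases List.mem_cons.mp hv with hv | hv
        · have : m = qn := by omega
          exact Or.inl (this ▸ hq1)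
        · exact Or.inr hv

-- ---- bitmask characterisation ----

lemma intCast_shiftLeft (a k : Nat) : ((a : Int) <<< k) = ((a <<< k : Nat) : Int) := by
  simp [Int.shiftLeft_eq, Nat.shiftLeft_eq]

lemma intCast_shiftRight (a k : Nat) : ((a : Int) >>> k) = ((a >>> k : Nat) : Int) := by
  simp [Int.shiftRight_eq]

lemma one_shiftLeft_int (k : Nat) : ((1 : Int) <<< k) = (((1 <<< k : Nat)) : Int) := by
  simpa using intCast_shiftLeft 1 k

lemma band_pow_ne_zero_iff (m k : Nat) :
    (PySem.Int.band ((m : Nat) : Int) ((1 : Int) <<< k) ≠ 0) ↔ m.testBit k = true := by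
  rw [one_shiftLeft_int, PySem.Int.band_natCast]
  rw [Nat.one_shiftLeft, Nat.and_two_pow]
  constructor
  · intro h
    by_contra hb
    simp [Bool.not_eq_true] at hb
    simp [hb] at h
  · intro h
    simp [h]

lemma maskfold_aux (c : Int → Prop) [DecidablePred c] :
    ∀ (xs : List Int) (m : Nat), (∀ x ∈ xs, 0 ≤ x) →
    ∃ rn : Nat,
      xs.foldl (fun m j => if c j then PySem.Int.bor m ((1 : Int) <<< j.toNat) else m) (m : Int)
        = (rn : Int) ∧
      ∀ t : Nat, rn.testBit t ↔ (m.testBit t ∨ ((t : Int) ∈ xs ∧ c (t : Int))) := by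
  intro xs
  induction xs with
  | nil => intro m _; exact ⟨m, rfl, by simp⟩
  | cons x xs ih =>
    intro m hnn
    have hx0 : 0 ≤ x := hnn x (by simp)
    have hxc : ((x.toNat : Nat) : Int) = x := Int.toNat_of_nonneg hx0
    by_cases hc : c x
    · have hstep : PySem.Int.bor (m : Int) ((1 : Int) <<< x.toNat)
          = ((m ||| (1 <<< x.toNat) : Nat) : Int) := by
        have h1 : ((1 : Int) <<< x.toNat) = (((1 <<< x.toNat : Nat)) : Int) := by
          have := intCast_shiftLeft 1 x.toNat
          simpa using this
        rw [h1, PySem.Int.bor_of_nonneg (by positivity) (by positivity)]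
        rw [Int.toNat_natCast, Int.toNat_natCast]
      obtain ⟨rn, hr, ht⟩ := ih (m ||| (1 <<< x.toNat)) (fun y hy => hnn y (by simp [hy]))
      refine ⟨rn, by simpa [hc, hstep] using hr, ?_⟩
      intro t
      rw [ht t]
      have htb : (m ||| (1 <<< x.toNat) : Nat).testBit t
          = (m.testBit t || decide (x.toNat = t)) := by
        simp [Nat.testBit_or, Nat.one_shiftLeft, Nat.testBit_two_pow]
      constructor
      · rintro (h | h)
        · rw [htb] at h
          rcases Bool.or_eq_true_iff.mp h with h | h
          · exact Or.inl h
          · have : x = (t : Int) := by have := of_decide_eq_true h; omega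
            exact Or.inr ⟨by simp [← this], this ▸ hc⟩
        · exact Or.inr ⟨by simp [h.1], h.2⟩
      · rintro (h | ⟨hm, hct⟩)
        · exact Or.inl (by rw [htb]; simp [h])
        · rcases List.mem_cons.mp hm with h | h
          · refine Or.inl ?_
            rw [htb]
            have : x.toNat = t := by omega
            simp [this]
          · exact Or.inr ⟨h, hct⟩
    · obtain ⟨rn, hr, ht⟩ := ih m (fun y hy => hnn y (by simp [hy]))
      refine ⟨rn, by simpa [hc] using hr, ?_⟩
      intro t
      rw [ht t]
      constructor
      · rintro (h | h)
        · exact Or.inl h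
        · exact Or.inr ⟨by simp [h.1], h.2⟩
      · rintro (h | ⟨hm, hct⟩)
        · exact Or.inl h
        · rcases List.mem_cons.mp hm with h | h
          · exact absurd (h ▸ hct) hc
          · exact Or.inr ⟨h, hct⟩

lemma buildMask_spec (signs : List (List Int)) (n i : Int) :
    ∃ rn : Nat, buildMask signs n i = (rn : Int) ∧
      ∀ t : Nat, rn.testBit t ↔ ((t : Int) < n ∧
        ((PySem.List.pyGet? signs i).bind fun r => PySem.List.pyGet? r (t : Int)) = some 1) := by
  obtain ⟨rn, hr, ht⟩ := maskfold_aux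
    (fun j => ((PySem.List.pyGet? signs i).bind fun r => PySem.List.pyGet? r j) = some 1)
    (PySem.List.pyRange 0 n 1) 0
    (fun x hx => (PySem.List.mem_pyRange_one.mp hx).1)
  refine ⟨rn, by simpa [buildMask] using hr, ?_⟩
  intro t
  rw [ht t]
  simp [PySem.List.mem_pyRange_one]

-- abbreviation for "bit j of mask i is set"
def MB (masks : List Int) (i j : Nat) : Prop := ((masks.getD i 0).toNat).testBit j

def MaskInv (signs : List (List Int)) (n : Int) (masks : List Int) (K : Nat) : Prop :=
  masks.length = n.toNat ∧
  (∀ i, i < n.toNat → 0 ≤ masks.getD i 0) ∧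
  (∀ i j : Nat, i < n.toNat → (MB masks i j ↔ Pk signs n K i j))

lemma warshallStep_formula {n : Int} {masks : List Int} {K : Nat}
    (hlen : masks.length = n.toNat) (hK : K < n.toNat)
    (hnn : ∀ i, i < n.toNat → 0 ≤ masks.getD i 0) :
    (warshallStep n masks (K : Int)).length = n.toNat ∧
    ∀ i, i < n.toNat →
      (warshallStep n masks (K : Int)).getD i 0 =
        (if (masks.getD i 0).toNat.testBit K
         then (((masks.getD i 0).toNat ||| (masks.getD K 0).toNat : Nat) : Int)
         else masks.getD i 0) := by
  have hn : ((n.toNat : Nat) : Int) = n := Int.toNat_of_nonneg (by omega)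
  set F : List Int → Int → List Int := fun ms i =>
      if PySem.Int.band (PySem.List.pyGetD ms i 0) ((1 : Int) <<< (K : Int).toNat) ≠ 0 then
        PySem.List.pySetD ms i
          (PySem.Int.bor (PySem.List.pyGetD ms i 0) (PySem.List.pyGetD ms (K : Int) 0))
      else ms with hF
  have key : ∀ I : Nat, I ≤ n.toNat →
      ((PySem.List.pyRange 0 (I : Int) 1).foldl F masks).length = n.toNat ∧
      ∀ i, i < n.toNat →
        ((PySem.List.pyRange 0 (I : Int) 1).foldl F masks).getD i 0 =
          (if i < I ∧ (masks.getD i 0).toNat.testBit K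
           then (((masks.getD i 0).toNat ||| (masks.getD K 0).toNat : Nat) : Int)
           else masks.getD i 0) := by
    intro I
    induction I with
    | zero =>
      intro _
      rw [PySem.List.pyRange_one_eq_nil (by omega)]
      exact ⟨by simpa using hlen, fun i hi => by simp⟩
    | succ I ih =>
      intro hI1
      obtain ⟨ihlen, ihval⟩ := ih (by omega)
      have hsplit : PySem.List.pyRange 0 ((I + 1 : Nat) : Int) 1
          = PySem.List.pyRange 0 (I : Int) 1 ++ [(I : Int)] := by
        push_cast
        exact PySem.List.pyRange_one_succ_right (by omega)
      rw [hsplit, List.foldl_append]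
      simp only [List.foldl_cons, List.foldl_nil]
      set g := (PySem.List.pyRange 0 (I : Int) 1).foldl F masks with hg
      have hgI : g.getD I 0 = masks.getD I 0 := by
        rw [ihval I (by omega)]; simp
      have hgK : g.getD K 0 = masks.getD K 0 := by
        rw [ihval K hK]
        split
        · rw [Nat.or_self, Int.toNat_of_nonneg (hnn K hK)]
        · rfl
      have hInn : 0 ≤ masks.getD I 0 := hnn I (by omega)
      have hmI : masks.getD I 0 = (((masks.getD I 0).toNat : Nat) : Int) :=
        (Int.toNat_of_nonneg hInn).symm
      have hmK' : masks.getD K 0 = (((masks.getD K 0).toNat : Nat) : Int) :=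
        (Int.toNat_of_nonneg (hnn K hK)).symm
      have hget : PySem.List.pyGetD g ((I : Nat) : Int) 0 = masks.getD I 0 := by
        rw [PySem.List.pyGetD_natCast, hgI]
      have hgetK : PySem.List.pyGetD g ((K : Nat) : Int) 0 = masks.getD K 0 := by
        rw [PySem.List.pyGetD_natCast, hgK]
      have hcond : (PySem.Int.band (PySem.List.pyGetD g ((I : Nat) : Int) 0)
            ((1 : Int) <<< ((K : Nat) : Int).toNat) ≠ 0)
          ↔ (masks.getD I 0).toNat.testBit K = true := by
        rw [hget, Int.toNat_natCast, hmI]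
        exact band_pow_ne_zero_iff _ _
      by_cases hb : (masks.getD I 0).toNat.testBit K = true
      · have hstep : F g ((I : Nat) : Int) =
            g.set I (((((masks.getD I 0).toNat ||| (masks.getD K 0).toNat : Nat)) : Int)) := by
          rw [hF]
          simp only []
          rw [if_pos (hcond.mpr hb)]
          rw [hget, hgetK]
          rw [hmI, hmK', PySem.Int.bor_of_nonneg (by positivity) (by positivity)]
          rw [Int.toNat_natCast, Int.toNat_natCast]
          simp [PySem.List.pySetD_natCast]
        rw [hstep]
        refine ⟨by simpa using ihlen, ?_⟩
        intro i hi
        rw [getD_set _ _ _ _ (by omega)]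
        by_cases hiI : i = I
        · subst hiI
          rw [if_pos rfl, if_pos ⟨by omega, hb⟩]
        · rw [if_neg hiI, ihval i hi]
          have : (i < I + 1) ↔ (i < I) := by omega
          simp [this]
      · have hstep : F g ((I : Nat) : Int) = g := by
          rw [hF]
          simp only []
          rw [if_neg (fun h => hb (hcond.mp h))]
        rw [hstep]
        refine ⟨ihlen, ?_⟩
        intro i hi
        rw [ihval i hi]
        by_cases hiI : i = I
        · subst hiI
          simp only [Bool.not_eq_true] at hb
          have hb' : (masks[i]?.getD 0).toNat.testBit K = false := by
            simpa [List.getD_eq_getElem?_getD] using hb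
          rw [if_neg (by simp [hb']), if_neg (by simp [hb'])]
        · have : (i < I + 1 ∧ (masks.getD i 0).toNat.testBit K) ↔
              (i < I ∧ (masks.getD i 0).toNat.testBit K) := by
            constructor
            · rintro ⟨h1, h2⟩; exact ⟨by omega, h2⟩
            · rintro ⟨h1, h2⟩; exact ⟨by omega, h2⟩
          rw [if_congr this rfl rfl]
      
  have := key n.toNat le_rfl
  rw [hn] at this
  unfold warshallStep
  rw [← hF]
  refine ⟨this.1, fun i hi => ?_⟩
  rw [this.2 i hi]
  have hiff : (i < n.toNat ∧ (masks.getD i 0).toNat.testBit K = true)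
      ↔ ((masks.getD i 0).toNat.testBit K = true) := by simp [hi]
  rw [if_congr hiff rfl rfl]

lemma Pk_zero {signs : List (List Int)} {n : Int} {i j : Nat} :
    Pk signs n 0 i j ↔ edg signs n i j := by
  constructor
  · rintro ⟨l, hb, hc⟩
    cases l with
    | nil => exact hc
    | cons m l => exact absurd (hb m (by simp)) (by omega)
  · intro h
    exact ⟨[], by simp, h⟩

lemma MaskInv_step {signs : List (List Int)} {n : Int} {masks : List Int} {K : Nat}
    (h : MaskInv signs n masks K) (hK : K < n.toNat) :
    MaskInv signs n (warshallStep n masks (K : Int)) (K + 1) := by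
  obtain ⟨hlen, hnn, hiff⟩ := h
  obtain ⟨hlen', hval⟩ := warshallStep_formula hlen hK hnn
  refine ⟨hlen', ?_, ?_⟩
  · intro i hi
    rw [hval i hi]
    split
    · positivity
    · exact hnn i hi
  · intro i j hi
    have hmb : MB (warshallStep n masks (K : Int)) i j ↔
        (Pk signs n K i j ∨ (Pk signs n K i K ∧ Pk signs n K K j)) := by
      simp only [MB]
      rw [hval i hi]
      have h1 := hiff i j hi
      have h2 := hiff K j hK
      have hiK := hiff i K hi
      simp only [MB] at h1 h2 hiK
      by_cases hb : (masks.getD i 0).toNat.testBit K = true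
      · rw [if_pos hb, Int.toNat_natCast, Nat.testBit_or]
        have h3 : Pk signs n K i K := hiK.mp hb
        constructor
        · intro hor
          rcases Bool.or_eq_true_iff.mp hor with hx | hx
          · exact Or.inl (h1.mp hx)
          · exact Or.inr ⟨h3, h2.mp hx⟩
        · rintro (hx | ⟨_, hx⟩)
          · exact Bool.or_eq_true_iff.mpr (Or.inl (h1.mpr hx))
          · exact Bool.or_eq_true_iff.mpr (Or.inr (h2.mpr hx))
      · rw [if_neg hb]
        constructor
        · intro hh
          exact Or.inl (h1.mp hh)
        · rintro (hh | ⟨hik, _⟩)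
          · exact h1.mpr hh
          · exact absurd (hiK.mpr hik) hb
    rw [hmb, ← Pk_succ]

lemma masks0_eq (signs : List (List Int)) (n : Int) :
    (PySem.List.pyRange 0 n 1).foldl (fun acc i => acc ++ [buildMask signs n i]) []
      = (PySem.List.pyRange 0 n 1).map (buildMask signs n) := by
  rw [PySem.List.foldl_append_singleton_eq_map]
  simp

lemma masks0_getD (signs : List (List Int)) (n : Int) {i : Nat} (hi : i < n.toNat) :
    ((PySem.List.pyRange 0 n 1).foldl (fun acc i => acc ++ [buildMask signs n i]) []).getD i 0
      = buildMask signs n (i : Int) := by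
  rw [masks0_eq, List.getD_eq_getElem?_getD, List.getElem?_map,
    PySem.List.getElem?_pyRange_one]
  simp only [if_pos (by omega : i < (n - 0).toNat)]
  simp

lemma masksFinal_inv (signs : List (List Int)) (n : Int) :
    MaskInv signs n
      ((PySem.List.pyRange 0 n 1).foldl (fun ms k => warshallStep n ms k)
        ((PySem.List.pyRange 0 n 1).foldl (fun acc i => acc ++ [buildMask signs n i]) []))
      n.toNat := by
  set masks0 := (PySem.List.pyRange 0 n 1).foldl (fun acc i => acc ++ [buildMask signs n i]) []
    with hm0
  have base : MaskInv signs n masks0 0 := by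
    refine ⟨?_, ?_, ?_⟩
    · rw [hm0, masks0_eq]
      simp [PySem.List.length_pyRange_one]
    · intro i hi
      rw [hm0, masks0_getD signs n hi]
      obtain ⟨rn, heq, _⟩ := buildMask_spec signs n (i : Int)
      rw [heq]
      positivity
    · intro i j hi
      simp only [MB]
      rw [hm0, masks0_getD signs n hi]
      obtain ⟨rn, heq, ht⟩ := buildMask_spec signs n (i : Int)
      rw [heq, Int.toNat_natCast, Pk_zero]
      rw [show (rn.testBit j = true) ↔ _ from ht j]
      unfold edg
      have : (i : Int) < n := by omega
      tauto
  have houter : (PySem.List.pyRange 0 n 1).foldl (fun ms k => warshallStep n ms k) masks0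
      = (List.range n.toNat).foldl (fun ms (k : Nat) => warshallStep n ms (k : Int)) masks0 := by
    rw [PySem.List.pyRange_one, List.foldl_map]
    simp
  rw [houter]
  have key : ∀ Kc, Kc ≤ n.toNat →
      MaskInv signs n
        ((List.range Kc).foldl (fun ms (k : Nat) => warshallStep n ms (k : Int)) masks0) Kc := by
    intro Kc
    induction Kc with
    | zero => intro _; simpa using base
    | succ K ih =>
      intro hK
      rw [List.range_succ, List.foldl_append]
      simp only [List.foldl_cons, List.foldl_nil]
      exact MaskInv_step (ih (by omega)) (by omega)
  exact key n.toNat le_rfl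

-- ---- final equality ----

lemma getD_eq_getElem' (xs : List Int) (j : Nat) (h : j < xs.length) : xs.getD j 0 = xs[j] := by
  rw [List.getD_eq_getElem?_getD, List.getElem?_eq_getElem h]
  rfl

lemma and_one_testBit (m j : Nat) : (m >>> j) &&& 1 = if m.testBit j then 1 else 0 := by
  have h : m.testBit j = decide ((m >>> j) % 2 = 1) := by simp [Nat.testBit]
  rw [Nat.and_one_is_mod, h]
  rcases Nat.mod_two_eq_zero_or_one (m >>> j) with h2 | h2 <;> simp [h2]

theorem solution_eq_alt (n : Int) (signs : List (List Int)) :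
    solution n signs = solution_alt n signs := by
  have hA : solution n signs = (PySem.List.pyRange 0 n 1).map
      (fun i => bfs (rootList signs n) (List.replicate n.toNat 0)
        ((PySem.List.pyGet? (rootList signs n) i).getD [])) := by
    unfold solution
    rw [PySem.List.foldl_append_singleton_eq_map]
    simp
  obtain ⟨hlenM, hnnM, hiffM⟩ := masksFinal_inv signs n
  set masksF := (PySem.List.pyRange 0 n 1).foldl (fun ms k => warshallStep n ms k)
      ((PySem.List.pyRange 0 n 1).foldl (fun acc i => acc ++ [buildMask signs n i]) [])
    with hMF
  have hB : solution_alt n signs =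
      masksF.map (fun m => (PySem.List.pyRange 0 n 1).map
        (fun j => PySem.Int.band (m >>> j.toNat) 1)) := by
    rfl
  rw [hA, hB]
  apply List.ext_getElem
  · simp [PySem.List.length_pyRange_one, hlenM]
  · intro i hi1 hi2
    have hiN : i < n.toNat := by
      simpa [PySem.List.length_pyRange_one] using hi1
    have hin : (i : Int) < n := by omega
    -- the A-side row
    rw [List.getElem_map, PySem.List.getElem_pyRange_one]
    have hzr : ((0 : Int) + (i : Nat)) = ((i : Nat) : Int) := by omega
    rw [hzr, pyGet?_rootList hiN]
    simp only [Option.getD_some]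
    have hinv : bfsInv signs n i (List.replicate n.toNat 0) (rootRow signs n (i : Int)) := by
      refine ⟨by simp, ?_, ?_, ?_, ?_, ?_⟩
      · intro j hj
        left
        simp [List.getD_eq_getElem?_getD, hj]
      · intro j hj hjv
        exfalso
        simp [List.getD_eq_getElem?_getD, hj] at hjv
      · intro x hx
        obtain ⟨hx0, hxn⟩ := mem_rootRow_bounds hx
        refine ⟨x.toNat, (Int.toNat_of_nonneg hx0).symm, [], ?_⟩
        show edg signs n i x.toNat
        rw [← mem_rootRow hin, Int.toNat_of_nonneg hx0]
        exact hx
      · intro m hm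
        exact Or.inr ((mem_rootRow hin).mpr hm)
      · intro j m hj hjv
        exfalso
        simp [List.getD_eq_getElem?_getD, hj] at hjv
    obtain ⟨hlenA, hentA⟩ := bfs_correct _ _ hinv
    -- the B-side row
    rw [List.getElem_map]
    apply List.ext_getElem
    · simp [PySem.List.length_pyRange_one, hlenA]
    · intro j hj1 hj2
      have hjN : j < n.toNat := by
        simpa [hlenA] using hj1
      rw [List.getElem_map, PySem.List.getElem_pyRange_one]
      have hzr2 : ((0 : Int) + (j : Nat)) = ((j : Nat) : Int) := by omega
      rw [hzr2, Int.toNat_natCast]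
      -- B entry value
      have hiM : i < masksF.length := by omega
      have hmval : masksF[i] = masksF.getD i 0 := (getD_eq_getElem' masksF i hiM).symm
      set mn := (masksF.getD i 0).toNat with hmn
      have hcast : masksF[i] = ((mn : Nat) : Int) := by
        rw [hmval, hmn, Int.toNat_of_nonneg (hnnM i hiN)]
      have hBval : PySem.Int.band (masksF[i] >>> j) 1
          = if mn.testBit j then 1 else 0 := by
        rw [hcast, intCast_shiftRight]
        have h1 : (1 : Int) = ((1 : Nat) : Int) := by norm_num
        rw [h1, PySem.Int.band_natCast, and_one_testBit]
        split <;> simp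
      rw [hBval]
      -- A entry value
      rw [← getD_eq_getElem' _ j hj1]
      obtain ⟨⟨hA1, hA2⟩, hA01⟩ := hentA j hjN
      have hPk : (mn.testBit j = true) ↔ Pk signs n n.toNat i j := by
        have := hiffM i j hiN
        simpa [MB, hmn] using this
      by_cases hP : Pk signs n n.toNat i j
      · rw [if_pos (hPk.mpr hP)]
        exact hA2 (Reach_iff_PkN.mpr hP)
      · rw [if_neg (by simp [hPk, hP])]
        rcases hA01 with hv | hv
        · exact hv
        · exact absurd (Reach_iff_PkN.mp (hA1 hv)) hP

-- ===== VERDICT (by name: the statement is the Claim_ definition above) =====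
theorem solution_spec : Claim_equal_solution := by
  intro n signs _ _
  unfold Spec_solution
  exact solution_eq_alt n signs
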